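-- pv_equiv track=rewrite | github.com/MrBrantCode/unitest_baseline | mut_generate/mist_train_cf/cf_65551/solution.py | MoodyCoffeeShopOwner
-- ===== SOURCE A (Python) =====
-- def MoodyCoffeeShopOwner(customers, moody, X, Y):
--     n = len(customers)
--     cumulative = [0]*(n+1)
--     for i in range(n):
--         cumulative[i+1] = cumulative[i]+customers[i] if moody[i]==0 else cumulative[i]
--     max_satisfaction = 0
--     dp = [0]*(n+1)
--     moody_customers = [0]*(n+1)
--     for i in range(n):
--         if moody[i]==1:
--             moody_customers[i+1] = moody_customers[i] + customers[i]
--         else: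
--             moody_customers[i+1] = moody_customers[i]
--         dp[i+1] = max(dp[i], cumulative[i+1])
--         if i>=X-1:
--             if i+Y+1<=n:
--                 dp[i+Y+1] = max(dp[i+Y+1], moody_customers[i+1]-(moody_customers[i-X+1] if i-X+1>=0 else 0)+cumulative[i-X+1])
--             else:
--                 max_satisfaction = max(max_satisfaction, moody_customers[i+1]-((moody_customers[i-X+1]) if i-X+1>=0 else 0)+cumulative[i-X+1])
--     return max_satisfaction
-- ===== SOURCE B (Python) =====
-- def MoodyCoffeeShopOwner(customers, moody, X, Y):
--     n = len(customers)
--     lo = max(0, X - 1, n - Y)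
--     best = 0
--     if lo <= n - 1:
--         window = sum(customers[j] for j in range(lo - X + 1, lo + 1) if moody[j] == 1)
--         nonmoody = sum(customers[j] for j in range(lo - X + 1) if moody[j] == 0)
--         best = max(best, window + nonmoody)
--         for i in range(lo + 1, n):
--             if moody[i] == 1:
--                 window += customers[i]
--             j = i - X
--             if moody[j] == 1:
--                 window -= customers[j]
--             elif moody[j] == 0:
--                 nonmoody += customers[j]
--             best = max(best, window + nonmoody)
--     return best
-- ===== Notes on version B (the rewrite author's own statement) =====
-- stated objective: simpler
-- what changed: A builds cumulative, dp and moody prefix arrays and scans all n indices (the dp table is dead); B drops the arrays entirely and does one sliding-window pass with two running sums over only the active index range [max(0, X-1, n-Y), n-1].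
import Mathlib
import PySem

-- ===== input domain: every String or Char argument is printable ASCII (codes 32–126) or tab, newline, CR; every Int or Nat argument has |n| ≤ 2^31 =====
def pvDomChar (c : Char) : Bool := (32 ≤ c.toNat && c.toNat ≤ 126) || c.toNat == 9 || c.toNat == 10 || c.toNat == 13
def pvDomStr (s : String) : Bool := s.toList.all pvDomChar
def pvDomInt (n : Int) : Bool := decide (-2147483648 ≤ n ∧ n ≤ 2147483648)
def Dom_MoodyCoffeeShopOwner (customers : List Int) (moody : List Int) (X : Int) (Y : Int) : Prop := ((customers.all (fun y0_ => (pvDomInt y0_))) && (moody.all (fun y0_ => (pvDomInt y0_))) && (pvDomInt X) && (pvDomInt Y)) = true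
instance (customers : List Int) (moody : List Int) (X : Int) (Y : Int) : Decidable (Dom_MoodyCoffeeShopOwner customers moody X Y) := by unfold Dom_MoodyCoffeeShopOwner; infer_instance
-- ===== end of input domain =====

-- B replaces A's three prefix/dp arrays and full-length scan by a single sliding-window pass
-- over the active index range only (objective: simpler; equal return values proved below).


-- ===== PORT A =====
-- Literal transliteration of A; each for-loop body is a named step function folded over
-- its range.  Indexing/assignment uses the total forms pyGetD/pySetD: under Pre_ every
-- index A evaluates is in range, so they are Python-exact there (where Python raises
-- IndexError the input is outside Pre_).

-- body of 'for i in range(n): cumulative[i+1] = cumulative[i]+customers[i] if moody[i]==0 else cumulative[i]'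
def MoodyCoffeeShopOwnerCumStep (customers moody : List Int) (cum : List Int) (i : Int) : List Int :=
  PySem.List.pySetD cum (i + 1)
    (if PySem.List.pyGetD moody i 0 == 0 then
        PySem.List.pyGetD cum i 0 + PySem.List.pyGetD customers i 0
      else PySem.List.pyGetD cum i 0)

-- body of the main 'for i in range(n)' loop; state = (max_satisfaction, dp, moody_customers)
def MoodyCoffeeShopOwnerStep (customers moody : List Int) (X Y n : Int) (cumulative : List Int)
    (st : Int × List Int × List Int) (i : Int) : Int × List Int × List Int :=
  let msat := st.1
  let dp := st.2.1
  let mc := st.2.2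
  let mc := if PySem.List.pyGetD moody i 0 == 1 then
      PySem.List.pySetD mc (i + 1) (PySem.List.pyGetD mc i 0 + PySem.List.pyGetD customers i 0)
    else
      PySem.List.pySetD mc (i + 1) (PySem.List.pyGetD mc i 0)
  let dp := PySem.List.pySetD dp (i + 1) (max (PySem.List.pyGetD dp i 0) (PySem.List.pyGetD cumulative (i + 1) 0))
  if X - 1 ≤ i then
    let v := PySem.List.pyGetD mc (i + 1) 0 -
        (if 0 ≤ i - X + 1 then PySem.List.pyGetD mc (i - X + 1) 0 else 0) +
        PySem.List.pyGetD cumulative (i - X + 1) 0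
    if i + Y + 1 ≤ n then
      (msat, PySem.List.pySetD dp (i + Y + 1) (max (PySem.List.pyGetD dp (i + Y + 1) 0) v), mc)
    else
      (max msat v, dp, mc)
  else (msat, dp, mc)

def MoodyCoffeeShopOwner (customers : List Int) (moody : List Int) (X : Int) (Y : Int) : Int :=
  let n : Int := PySem.List.len customers
  let cumulative : List Int := (PySem.List.pyRange 0 n 1).foldl
    (MoodyCoffeeShopOwnerCumStep customers moody) (List.replicate (n + 1).toNat 0)
  let st := (PySem.List.pyRange 0 n 1).foldl
    (MoodyCoffeeShopOwnerStep customers moody X Y n cumulative)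
    (0, List.replicate (n + 1).toNat 0, List.replicate (n + 1).toNat 0)
  st.1

-- ===== PORT B =====
-- Literal transliteration of Source B (sliding window over the active range only);
-- the for-loop body is the named step function, state = (window, nonmoody, best).
def MoodyCoffeeShopOwnerAltStep (customers moody : List Int) (X : Int)
    (st : Int × Int × Int) (i : Int) : Int × Int × Int :=
  let window := if PySem.List.pyGetD moody i 0 == 1 then st.1 + PySem.List.pyGetD customers i 0 else st.1
  let j := i - X
  let window := if PySem.List.pyGetD moody j 0 == 1 then window - PySem.List.pyGetD customers j 0 else window
  let nonmoody := if PySem.List.pyGetD moody j 0 == 1 then st.2.1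
    else if PySem.List.pyGetD moody j 0 == 0 then st.2.1 + PySem.List.pyGetD customers j 0
    else st.2.1
  (window, nonmoody, max st.2.2 (window + nonmoody))

def MoodyCoffeeShopOwner_alt (customers : List Int) (moody : List Int) (X : Int) (Y : Int) : Int :=
  let n : Int := PySem.List.len customers
  let lo : Int := max 0 (max (X - 1) (n - Y))
  if lo ≤ n - 1 then
    let window : Int := (PySem.List.pyRange (lo - X + 1) (lo + 1) 1).foldl (fun s j =>
        if PySem.List.pyGetD moody j 0 == 1 then s + PySem.List.pyGetD customers j 0 else s) 0
    let nonmoody : Int := (PySem.List.pyRange 0 (lo - X + 1) 1).foldl (fun s j =>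
        if PySem.List.pyGetD moody j 0 == 0 then s + PySem.List.pyGetD customers j 0 else s) 0
    let best : Int := max 0 (window + nonmoody)
    let st := (PySem.List.pyRange (lo + 1) n 1).foldl
      (MoodyCoffeeShopOwnerAltStep customers moody X) (window, nonmoody, best)
    st.2.2
  else 0

-- ===== PRECONDITION & SPEC =====
-- Pre_ is exactly where Python A returns normally: it excludes only inputs on which A
-- raises IndexError (moody shorter than customers; negative X on a nonempty list, where
-- cumulative[i-X+1] overruns the array; Y so negative that the write dp[i+Y+1] underruns -(n+1)).
def Pre_MoodyCoffeeShopOwner (customers : List Int) (moody : List Int) (X : Int) (Y : Int) : Prop :=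
  customers.length ≤ moody.length ∧
  (0 ≤ X ∨ customers = []) ∧
  ((customers.length : Int) ≤ max 0 (X - 1) ∨ 0 ≤ max 0 (X - 1) + Y + 2 + customers.length)
instance (customers : List Int) (moody : List Int) (X : Int) (Y : Int) : Decidable (Pre_MoodyCoffeeShopOwner customers moody X Y) := by unfold Pre_MoodyCoffeeShopOwner; infer_instance

def pvWitness_MoodyCoffeeShopOwner : List Int × List Int × Int × Int := ([1, 2], [0, 1], 1, 1)

def Spec_MoodyCoffeeShopOwner (customers : List Int) (moody : List Int) (X : Int) (Y : Int) (out : Int) : Prop := out = MoodyCoffeeShopOwner_alt customers moody X Y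
instance (customers : List Int) (moody : List Int) (X : Int) (Y : Int) (out : Int) : Decidable (Spec_MoodyCoffeeShopOwner customers moody X Y out) := by unfold Spec_MoodyCoffeeShopOwner; infer_instance

-- ===== CLAIM (what is proved, stated in full; the proofs are below) =====
def Claim_equal_MoodyCoffeeShopOwner : Prop := ∀ (customers : List Int) (moody : List Int) (X : Int) (Y : Int), Dom_MoodyCoffeeShopOwner customers moody X Y → Pre_MoodyCoffeeShopOwner customers moody X Y → Spec_MoodyCoffeeShopOwner customers moody X Y (MoodyCoffeeShopOwner customers moody X Y)

-- ===== LEMMAS AND PROOFS =====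

-- pref cs ms v k: sum of cs[j] over j < k with ms[j] == v (the prefix sums both programs are about)
def pref (cs ms : List Int) (v : Int) : Nat → Int
  | 0 => 0
  | k + 1 => pref cs ms v k + (if ms.getD k 0 == v then cs.getD k 0 else 0)

-- the common candidate value both programs consider at index i
def gVal (cs ms : List Int) (X : Int) (i : Int) : Int :=
  pref cs ms 1 (i + 1).toNat - pref cs ms 1 (i - X + 1).toNat + pref cs ms 0 (i - X + 1).toNat

theorem pref_cast (cs ms : List Int) (v : Int) (i : Int) (h : 0 ≤ i) :
    pref cs ms v (i + 1).toNat = pref cs ms v i.toNat + (if ms.getD i.toNat 0 == v then cs.getD i.toNat 0 else 0) := by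
  have : (i + 1).toNat = i.toNat + 1 := by omega
  rw [this, pref]

theorem pyGetD_nonneg' (xs : List Int) (i : Int) (h : 0 ≤ i) :
    PySem.List.pyGetD xs i 0 = xs.getD i.toNat 0 := by
  have hi : i = ((i.toNat : Nat) : Int) := by omega
  rw [hi, PySem.List.pyGetD_natCast]
  congr 1

-- setting entry j of a mapped range
theorem set_map_range {α : Type} (f : Nat → α) (m j : Nat) (v : α) (_hj : j < m) :
    ((List.range m).map f).set j v = (List.range m).map (fun k => if k = j then v else f k) := by
  apply List.ext_getElem
  · simp
  · intro i h1 h2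
    simp only [List.length_set, List.length_map, List.length_range] at h1
    rw [List.getElem_set]
    by_cases h : j = i
    · simp [h, List.getElem_map, List.getElem_range]
    · simp only [if_neg h, List.getElem_map, List.getElem_range]
      rw [if_neg (by omega)]

-- a range-sum loop computes a difference of prefix sums
theorem sum_range_pref_aux (cs ms : List Int) (v a : Int) (ha : 0 ≤ a) :
    ∀ (k : Nat) (b : Int) (s : Int), b - a = k →
    (PySem.List.pyRange a b 1).foldl (fun s j =>
        if PySem.List.pyGetD ms j 0 == v then s + PySem.List.pyGetD cs j 0 else s) s
      = s + pref cs ms v b.toNat - pref cs ms v a.toNat := by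
  intro k
  induction k with
  | zero =>
      intro b s hb
      rw [PySem.List.pyRange_one_eq_nil (by omega)]
      have hba : b = a := by omega
      simp [hba]
  | succ k ih =>
      intro b s hb
      have hb1 : a ≤ b - 1 := by omega
      have hbb : b = (b - 1) + 1 := by omega
      rw [hbb, PySem.List.pyRange_one_succ_right hb1, List.foldl_append, ih (b - 1) s (by omega)]
      simp only [List.foldl_cons, List.foldl_nil]
      rw [pref_cast cs ms v (b - 1) (by omega), pyGetD_nonneg' ms (b - 1) (by omega),
        pyGetD_nonneg' cs (b - 1) (by omega)]
      split <;> omega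

theorem sum_range_pref (cs ms : List Int) (v : Int) (a b : Int) (ha : 0 ≤ a) (hab : a ≤ b) :
    (PySem.List.pyRange a b 1).foldl (fun s j =>
        if PySem.List.pyGetD ms j 0 == v then s + PySem.List.pyGetD cs j 0 else s) 0
      = pref cs ms v b.toNat - pref cs ms v a.toNat := by
  have := sum_range_pref_aux cs ms v a ha (b - a).toNat b 0 (by omega)
  omega

-- B's step advances the sliding-window invariant
theorem bstep_eq (cs ms : List Int) (X : Int) (hX : 0 ≤ X) (w nm b t : Int) (ht : X ≤ t)
    (hw : w = pref cs ms 1 t.toNat - pref cs ms 1 (t - X).toNat)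
    (hnm : nm = pref cs ms 0 (t - X).toNat) :
    MoodyCoffeeShopOwnerAltStep cs ms X (w, nm, b) t =
      (pref cs ms 1 (t + 1).toNat - pref cs ms 1 (t + 1 - X).toNat,
        pref cs ms 0 (t + 1 - X).toNat, max b (gVal cs ms X t)) := by
  subst hw hnm
  unfold MoodyCoffeeShopOwnerAltStep gVal
  dsimp only
  rw [show t + 1 - X = t - X + 1 from by ring]
  rw [pyGetD_nonneg' ms t (by omega), pyGetD_nonneg' cs t (by omega),
    pyGetD_nonneg' ms (t - X) (by omega), pyGetD_nonneg' cs (t - X) (by omega),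
    pref_cast cs ms 1 t (by omega), pref_cast cs ms 1 (t - X) (by omega),
    pref_cast cs ms 0 (t - X) (by omega)]
  simp only [beq_iff_eq, Prod.mk.injEq]
  split_ifs <;> refine ⟨by omega, by omega, ?_⟩ <;> (congr 1; omega)

-- B's loop computes the running max of gVal over the remaining range
theorem bloop (cs ms : List Int) (X : Int) (hX : 0 ≤ X) :
    ∀ (k : Nat) (t w nm b : Int), X ≤ t → (cs.length : Int) - t ≤ k →
    w = pref cs ms 1 t.toNat - pref cs ms 1 (t - X).toNat →
    nm = pref cs ms 0 (t - X).toNat →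
    ((PySem.List.pyRange t (cs.length : Int) 1).foldl (MoodyCoffeeShopOwnerAltStep cs ms X) (w, nm, b)).2.2
      = (PySem.List.pyRange t (cs.length : Int) 1).foldl (fun acc i => max acc (gVal cs ms X i)) b := by
  intro k
  induction k with
  | zero =>
      intro t w nm b ht hk hw hnm
      rw [PySem.List.pyRange_one_eq_nil (by omega)]
      rfl
  | succ k ih =>
      intro t w nm b ht hk hw hnm
      by_cases hlt : t < (cs.length : Int)
      · rw [PySem.List.pyRange_one_cons hlt]
        simp only [List.foldl_cons]
        rw [bstep_eq cs ms X hX w nm b t ht hw hnm]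
        exact ih (t + 1) _ _ _ (by omega) (by omega) rfl rfl
      · rw [PySem.List.pyRange_one_eq_nil (by omega)]
        rfl

-- B equals the max of gVal over the active range
theorem alt_eq_spec (cs ms : List Int) (X Y : Int) (hX : 0 ≤ X ∨ cs = []) :
    MoodyCoffeeShopOwner_alt cs ms X Y
      = (PySem.List.pyRange (max 0 (max (X - 1) ((cs.length : Int) - Y))) (cs.length : Int) 1).foldl
          (fun b i => max b (gVal cs ms X i)) 0 := by
  unfold MoodyCoffeeShopOwner_alt
  simp only [PySem.List.len_eq]
  set lo := max 0 (max (X - 1) ((cs.length : Int) - Y)) with hlo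
  have hlo0 : (0 : Int) ≤ lo := hlo ▸ le_max_left _ _
  have hloX : X - 1 ≤ lo := hlo ▸ le_trans (le_max_left _ _) (le_max_right _ _)
  by_cases hc : lo ≤ (cs.length : Int) - 1
  · have hX0 : 0 ≤ X := by
      rcases hX with h | h
      · exact h
      · subst h; simp only [List.length_nil, Nat.cast_zero] at hc; omega
    rw [if_pos hc]
    rw [sum_range_pref cs ms 1 (lo - X + 1) (lo + 1) (by omega) (by omega)]
    rw [sum_range_pref cs ms 0 0 (lo - X + 1) (by omega) (by omega)]
    rw [show pref cs ms 0 ((0 : Int).toNat) = 0 from rfl, sub_zero]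
    rw [PySem.List.pyRange_one_cons (show lo < (cs.length : Int) from by omega)]
    simp only [List.foldl_cons]
    exact bloop cs ms X hX0 ((cs.length : Int) - (lo + 1)).toNat (lo + 1) _ _ _ (by omega) (by omega)
      (by rw [show lo + 1 - X = lo - X + 1 from by ring])
      (by rw [show lo + 1 - X = lo - X + 1 from by ring])
  · rw [if_neg hc, PySem.List.pyRange_one_eq_nil (by omega)]
    rfl

-- partially built prefix-sum array of A after t iterations
def prefListPartial (cs ms : List Int) (v : Int) (t : Nat) : List Int :=
  (List.range (cs.length + 1)).map (fun k => if k ≤ t then pref cs ms v k else 0)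

-- A's running max_satisfaction after the first t iterations
def Mval (cs ms : List Int) (X Y : Int) (t : Int) : Int :=
  ((PySem.List.pyRange 0 t 1).filter
    (fun i => decide (X - 1 ≤ i) && decide ((cs.length : Int) < i + Y + 1))).foldl
    (fun b i => max b (gVal cs ms X i)) 0

theorem prefListPartial_read (cs ms : List Int) (v : Int) (t : Nat) (i : Int)
    (h0 : 0 ≤ i) (h1 : i ≤ (cs.length : Int)) (h2 : i.toNat ≤ t) :
    PySem.List.pyGetD (prefListPartial cs ms v t) i 0 = pref cs ms v i.toNat := by
  rw [pyGetD_nonneg' _ i h0]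
  unfold prefListPartial
  rw [PySem.List.getD_map_range _ _ _ _ (by omega), if_pos h2]

theorem prefListPartial_set (cs ms : List Int) (v : Int) (t : Nat) (ht : t < cs.length) (w : Int)
    (hwv : w = pref cs ms v (t + 1)) :
    PySem.List.pySetD (prefListPartial cs ms v t) ((t : Int) + 1) w = prefListPartial cs ms v (t + 1) := by
  rw [show ((t : Int) + 1) = (((t + 1 : Nat)) : Int) from by push_cast; ring, PySem.List.pySetD_natCast]
  unfold prefListPartial
  rw [set_map_range _ _ _ _ (by omega)]
  apply List.map_congr_left
  intro k hk
  rw [List.mem_range] at hk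
  by_cases hk1 : k = t + 1
  · subst hk1; simp [hwv]
  · rw [if_neg hk1]
    split_ifs <;> first | rfl | omega

theorem Mval_succ (cs ms : List Int) (X Y : Int) (t : Nat) :
    Mval cs ms X Y ((t : Int) + 1) =
      if X - 1 ≤ (t : Int) ∧ (cs.length : Int) < (t : Int) + Y + 1 then
        max (Mval cs ms X Y t) (gVal cs ms X t)
      else Mval cs ms X Y t := by
  unfold Mval
  rw [PySem.List.pyRange_one_succ_right (show (0 : Int) ≤ (t : Int) from by omega)]
  rw [List.filter_append, List.foldl_append]
  simp only [List.filter_cons, List.filter_nil]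
  by_cases h1 : X - 1 ≤ (t : Int) <;> by_cases h2 : (cs.length : Int) < (t : Int) + Y + 1 <;>
    simp [h1, h2]

theorem replicate_eq (cs ms : List Int) (v : Int) :
    List.replicate (((cs.length : Int) + 1).toNat) (0 : Int) = prefListPartial cs ms v 0 := by
  unfold prefListPartial
  apply List.ext_getElem
  · simp only [List.length_replicate, List.length_map, List.length_range]
    omega
  · intro i h1 h2
    simp only [List.getElem_replicate, List.getElem_map, List.getElem_range]
    by_cases hi : i = 0
    · subst hi; simp [pref]
    · rw [if_neg (by omega)]

theorem cum_aux (cs ms : List Int) : ∀ t : Nat, t ≤ cs.length →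
    ((List.range t).map (fun (k : Nat) => (k : Int))).foldl (MoodyCoffeeShopOwnerCumStep cs ms)
        (prefListPartial cs ms 0 0)
      = prefListPartial cs ms 0 t := by
  intro t
  induction t with
  | zero => intro _; simp
  | succ t ih =>
      intro h
      rw [List.range_succ, List.map_append, List.foldl_append, ih (by omega)]
      simp only [List.map_cons, List.map_nil, List.foldl_cons, List.foldl_nil]
      unfold MoodyCoffeeShopOwnerCumStep
      rw [prefListPartial_read cs ms 0 t (t : Int) (by omega) (by omega) (by omega)]
      rw [PySem.List.pyGetD_natCast ms, PySem.List.pyGetD_natCast cs]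
      by_cases c : (ms.getD t 0 == 0) = true
      · rw [if_pos c, prefListPartial_set cs ms 0 t (by omega) _
          (by rw [show ((t : Int)).toNat = t from by omega, pref, if_pos c])]
      · rw [if_neg c, prefListPartial_set cs ms 0 t (by omega) _
          (by rw [show ((t : Int)).toNat = t from by omega, pref, if_neg c, add_zero])]

theorem cum_eq (cs ms : List Int) :
    (PySem.List.pyRange 0 (cs.length : Int) 1).foldl (MoodyCoffeeShopOwnerCumStep cs ms)
      (List.replicate (((cs.length : Int) + 1).toNat) 0) = prefListPartial cs ms 0 cs.length := by
  rw [PySem.List.pyRange_zero_nat, replicate_eq cs ms 0]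
  exact cum_aux cs ms cs.length le_rfl

theorem main_loop (cs ms : List Int) (X Y : Int) (hX : 0 ≤ X) (dp0 : List Int) :
    ∀ t : Nat, t ≤ cs.length →
    (((List.range t).map (fun (k : Nat) => (k : Int))).foldl
        (MoodyCoffeeShopOwnerStep cs ms X Y (cs.length : Int) (prefListPartial cs ms 0 cs.length))
        (0, dp0, prefListPartial cs ms 1 0)).1
      = Mval cs ms X Y (t : Int) ∧
    (((List.range t).map (fun (k : Nat) => (k : Int))).foldl
        (MoodyCoffeeShopOwnerStep cs ms X Y (cs.length : Int) (prefListPartial cs ms 0 cs.length))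
        (0, dp0, prefListPartial cs ms 1 0)).2.2
      = prefListPartial cs ms 1 t := by
  intro t
  induction t with
  | zero =>
      intro _
      have h0 : Mval cs ms X Y ((0 : Nat) : Int) = 0 := by
        unfold Mval
        rw [PySem.List.pyRange_one_eq_nil (by simp)]
        rfl
      exact ⟨h0.symm, rfl⟩
  | succ t ih =>
      intro h
      obtain ⟨ih1, ih2⟩ := ih (by omega)
      rw [List.range_succ, List.map_append, List.foldl_append]
      simp only [List.map_cons, List.map_nil, List.foldl_cons, List.foldl_nil]
      generalize hSg : ((List.range t).map (fun (k : Nat) => (k : Int))).foldl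
        (MoodyCoffeeShopOwnerStep cs ms X Y (cs.length : Int) (prefListPartial cs ms 0 cs.length))
        (0, dp0, prefListPartial cs ms 1 0) = S at ih1 ih2 ⊢
      obtain ⟨s1, s2, s3⟩ := S
      dsimp only at ih1 ih2
      subst ih1 ih2
      unfold MoodyCoffeeShopOwnerStep
      dsimp only
      rw [prefListPartial_read cs ms 1 t (t : Int) (by omega) (by omega) (by omega)]
      rw [PySem.List.pyGetD_natCast ms, PySem.List.pyGetD_natCast cs]
      by_cases c1 : (ms.getD t 0 == 1) = true
      · rw [if_pos c1, prefListPartial_set cs ms 1 t (by omega) _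
          (by rw [show ((t : Int)).toNat = t from by omega, pref, if_pos c1])]
        by_cases hb1 : X - 1 ≤ (t : Int)
        · rw [if_pos hb1, if_pos (show (0 : Int) ≤ (t : Int) - X + 1 from by omega)]
          rw [prefListPartial_read cs ms 1 (t + 1) ((t : Int) + 1) (by omega) (by omega) (by omega)]
          rw [prefListPartial_read cs ms 1 (t + 1) ((t : Int) - X + 1) (by omega) (by omega) (by omega)]
          rw [prefListPartial_read cs ms 0 cs.length ((t : Int) - X + 1) (by omega) (by omega) (by omega)]
          by_cases hb2 : (t : Int) + Y + 1 ≤ (cs.length : Int)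
          · rw [if_pos hb2]
            refine ⟨?_, rfl⟩
            dsimp only
            rw [show (((t + 1 : Nat)) : Int) = (t : Int) + 1 from by push_cast; ring, Mval_succ,
              if_neg (by omega)]
          · rw [if_neg hb2]
            refine ⟨?_, rfl⟩
            dsimp only
            rw [show (((t + 1 : Nat)) : Int) = (t : Int) + 1 from by push_cast; ring, Mval_succ,
              if_pos ⟨hb1, by omega⟩]
            rfl
        · rw [if_neg hb1]
          refine ⟨?_, rfl⟩
          dsimp only
          rw [show (((t + 1 : Nat)) : Int) = (t : Int) + 1 from by push_cast; ring, Mval_succ,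
            if_neg (by omega)]
      · rw [if_neg c1, prefListPartial_set cs ms 1 t (by omega) _
          (by rw [show ((t : Int)).toNat = t from by omega, pref, if_neg c1, add_zero])]
        by_cases hb1 : X - 1 ≤ (t : Int)
        · rw [if_pos hb1, if_pos (show (0 : Int) ≤ (t : Int) - X + 1 from by omega)]
          rw [prefListPartial_read cs ms 1 (t + 1) ((t : Int) + 1) (by omega) (by omega) (by omega)]
          rw [prefListPartial_read cs ms 1 (t + 1) ((t : Int) - X + 1) (by omega) (by omega) (by omega)]
          rw [prefListPartial_read cs ms 0 cs.length ((t : Int) - X + 1) (by omega) (by omega) (by omega)]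
          by_cases hb2 : (t : Int) + Y + 1 ≤ (cs.length : Int)
          · rw [if_pos hb2]
            refine ⟨?_, rfl⟩
            dsimp only
            rw [show (((t + 1 : Nat)) : Int) = (t : Int) + 1 from by push_cast; ring, Mval_succ,
              if_neg (by omega)]
          · rw [if_neg hb2]
            refine ⟨?_, rfl⟩
            dsimp only
            rw [show (((t + 1 : Nat)) : Int) = (t : Int) + 1 from by push_cast; ring, Mval_succ,
              if_pos ⟨hb1, by omega⟩]
            rfl
        · rw [if_neg hb1]
          refine ⟨?_, rfl⟩
          dsimp only
          rw [show (((t + 1 : Nat)) : Int) = (t : Int) + 1 from by push_cast; ring, Mval_succ,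
            if_neg (by omega)]

theorem Mval_final (cs ms : List Int) (X Y : Int) :
    Mval cs ms X Y (cs.length : Int)
      = (PySem.List.pyRange (max 0 (max (X - 1) ((cs.length : Int) - Y))) (cs.length : Int) 1).foldl
          (fun b i => max b (gVal cs ms X i)) 0 := by
  unfold Mval
  set lo := max 0 (max (X - 1) ((cs.length : Int) - Y)) with hlo
  have hlo0 : (0 : Int) ≤ lo := hlo ▸ le_max_left _ _
  have hfc : (PySem.List.pyRange 0 (cs.length : Int) 1).filter
      (fun i => decide (X - 1 ≤ i) && decide ((cs.length : Int) < i + Y + 1))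
      = (PySem.List.pyRange 0 (cs.length : Int) 1).filter (fun i => decide (lo ≤ i)) := by
    apply List.filter_congr
    intro i hi
    rw [PySem.List.mem_pyRange_one] at hi
    rw [← Bool.decide_and, decide_eq_decide, hlo, max_le_iff, max_le_iff]
    omega
  rw [hfc]
  by_cases hlN : lo ≤ (cs.length : Int)
  · rw [PySem.List.pyRange_one_append 0 lo (cs.length : Int) hlo0 hlN, List.filter_append]
    rw [List.filter_eq_nil_iff.mpr (by
      intro i hi
      rw [PySem.List.mem_pyRange_one] at hi
      simp only [decide_eq_true_eq]
      omega)]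
    rw [List.filter_eq_self.mpr (by
      intro i hi
      rw [PySem.List.mem_pyRange_one] at hi
      simp only [decide_eq_true_eq]
      omega)]
    simp
  · rw [List.filter_eq_nil_iff.mpr (by
      intro i hi
      rw [PySem.List.mem_pyRange_one] at hi
      simp only [decide_eq_true_eq]
      omega)]
    rw [PySem.List.pyRange_one_eq_nil (by omega)]

theorem a_eq_spec (cs ms : List Int) (X Y : Int) (hX : 0 ≤ X ∨ cs = []) :
    MoodyCoffeeShopOwner cs ms X Y
      = (PySem.List.pyRange (max 0 (max (X - 1) ((cs.length : Int) - Y))) (cs.length : Int) 1).foldl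
          (fun b i => max b (gVal cs ms X i)) 0 := by
  rcases hX with hX0 | hnil
  · unfold MoodyCoffeeShopOwner
    simp only [PySem.List.len_eq]
    rw [cum_eq cs ms, PySem.List.pyRange_zero_nat, replicate_eq cs ms 1]
    rw [(main_loop cs ms X Y hX0 (prefListPartial cs ms 1 0) cs.length le_rfl).1]
    exact Mval_final cs ms X Y
  · subst hnil
    unfold MoodyCoffeeShopOwner
    simp only [PySem.List.len_eq, List.length_nil, Nat.cast_zero]
    rw [PySem.List.pyRange_one_eq_nil (le_refl 0)]
    rw [PySem.List.pyRange_one_eq_nil (show (0:Int) ≤ max 0 (max (X - 1) (0 - Y)) from le_max_left _ _)]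
    rfl

-- ===== VERDICT (by name: the statement is the Claim_ definition above) =====
theorem MoodyCoffeeShopOwner_spec : Claim_equal_MoodyCoffeeShopOwner := by
  intro cs ms X Y _ hPre
  unfold Spec_MoodyCoffeeShopOwner
  rw [a_eq_spec cs ms X Y hPre.2.1, alt_eq_spec cs ms X Y hPre.2.1]
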